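-- pv_equiv track=rewrite | github.com/Rohithramkrish11/LeetCode_Problems | power_of_own_reverse.py | power_reverse
-- ===== SOURCE A (Python) =====
-- def power_reverse(n):
--     rev=0
--     num=n
--     while n>0:
--         m=n%10
--         rev=rev*10+m
--         n=n//10
--     return(pow(num,rev)%(pow(10,9)+7))
-- ===== SOURCE B (Python) =====
-- def power_reverse(n):
--     MOD = 1000000007
--     num = n
--     rev = 0
--     while n > 0:
--         rev = rev * 10 + n % 10
--         n //= 10
--     result = 1
--     base = num % MOD
--     e = rev
--     while e > 0:
--         if e & 1:
--             result = result * base % MOD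
--         base = base * base % MOD
--         e >>= 1
--     return result
-- ===== Notes on version B (the rewrite author's own statement) =====
-- stated objective: faster
-- what changed: B keeps the digit-reverse loop but replaces the builtin full integer power followed by one final reduction with binary modular exponentiation that reduces by the prime modulus at every squaring step, so intermediates stay bounded.
import Mathlib
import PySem

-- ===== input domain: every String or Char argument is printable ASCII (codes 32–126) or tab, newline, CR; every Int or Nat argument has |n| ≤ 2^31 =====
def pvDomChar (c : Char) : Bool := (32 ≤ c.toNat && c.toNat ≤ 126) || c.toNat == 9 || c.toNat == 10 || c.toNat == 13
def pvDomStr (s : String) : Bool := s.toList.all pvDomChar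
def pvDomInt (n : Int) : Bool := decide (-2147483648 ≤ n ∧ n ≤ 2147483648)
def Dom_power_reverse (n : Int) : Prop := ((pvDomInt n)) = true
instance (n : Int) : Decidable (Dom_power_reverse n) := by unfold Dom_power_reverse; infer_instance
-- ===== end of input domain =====

-- B replaces A's full integer power + one final reduction by binary modular exponentiation
-- (reduce mod 1000000007 at every squaring step); measurably faster on large n.

-- ===== PORT A =====
-- while n>0: m=n%10; rev=rev*10+m; n=n//10
def pvRevA (n rev : Int) : Int :=
  if n > 0 then pvRevA (PySem.Int.floordiv n 10) (rev * 10 + PySem.Int.mod n 10) else rev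
termination_by n.toNat
decreasing_by
  rename_i h
  rw [PySem.Int.floordiv_eq_ediv_of_pos (by norm_num)]
  omega

-- pow(num, rev): the reverse accumulator rev is always ≥ 0 (lemma pvRevA_nonneg below),
-- so Python's pow(num, rev) is exactly num ^ rev.toNat.
def power_reverse (n : Int) : Int :=
  let rev := pvRevA n 0
  let num := n
  PySem.Int.mod (num ^ rev.toNat) (10 ^ 9 + 7)

-- ===== PORT B =====
def pvMOD : Int := 1000000007

-- B's digit-reverse loop (same Python lines as A's)
def pvRevB (n rev : Int) : Int :=
  if n > 0 then pvRevB (PySem.Int.floordiv n 10) (rev * 10 + PySem.Int.mod n 10) else rev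
termination_by n.toNat
decreasing_by
  rename_i h
  rw [PySem.Int.floordiv_eq_ediv_of_pos (by norm_num)]
  omega

-- while e>0: if e&1: result=result*base%MOD; base=base*base%MOD; e>>=1
def pvModExp (result base e : Int) : Int :=
  if e > 0 then
    pvModExp (if PySem.Int.band e 1 = 1 then PySem.Int.mod (result * base) pvMOD else result)
             (PySem.Int.mod (base * base) pvMOD) (e >>> (1:Nat))
  else result
termination_by e.toNat
decreasing_by
  rename_i h
  rw [Int.shiftRight_eq_div_pow]
  norm_num
  omega

def power_reverse_alt (n : Int) : Int :=
  let num := n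
  let rev := pvRevB n 0
  pvModExp 1 (PySem.Int.mod num pvMOD) rev

-- ===== PRECONDITION & SPEC =====
def Spec_power_reverse (n : Int) (out : Int) : Prop := out = power_reverse_alt n
instance (n : Int) (out : Int) : Decidable (Spec_power_reverse n out) := by unfold Spec_power_reverse; infer_instance

-- ===== CLAIM (what is proved, stated in full; the proofs are below) =====
def Claim_equal_power_reverse : Prop := ∀ (n : Int), Dom_power_reverse n → Spec_power_reverse n (power_reverse n)

-- ===== LEMMAS AND PROOFS =====

theorem pvRevB_eq_pvRevA (n rev : Int) : pvRevB n rev = pvRevA n rev := by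
  fun_induction pvRevB n rev with
  | case1 n rev h ih => rw [pvRevA, if_pos h]; exact ih
  | case2 n rev h => rw [pvRevA, if_neg h]

theorem pvRevA_nonneg (n rev : Int) (h : 0 ≤ rev) : 0 ≤ pvRevA n rev := by
  fun_induction pvRevA n rev with
  | case1 n rev hn ih =>
      refine ih ?_
      have hm : 0 ≤ PySem.Int.mod n 10 := by
        rw [PySem.Int.mod_eq_emod_of_pos (by norm_num)]
        exact Int.emod_nonneg n (by norm_num)
      omega
  | case2 n rev hn => exact h

theorem pvPowEmod (a : Int) (k : Nat) (n : Int) : (a % n) ^ k % n = a ^ k % n :=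
  Int.ModEq.pow k (Int.emod_emod_of_dvd a dvd_rfl)

theorem pvModExp_eq (r b e : Int) :
    0 ≤ e → 0 ≤ r → r < pvMOD → pvModExp r b e = (r * b ^ e.toNat) % pvMOD := by
  fun_induction pvModExp r b e with
  | case1 r b e hpos ih =>
      intro he hr0 hrM
      have hM : (0:Int) < pvMOD := by norm_num [pvMOD]
      have hsh : e >>> (1:Nat) = e / 2 := by rw [Int.shiftRight_eq_div_pow]; norm_num
      have hband : PySem.Int.band e 1 = e % 2 := by
        rw [PySem.Int.band_one, PySem.Int.mod_eq_emod_of_pos (by norm_num)]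
      have hmodB : ∀ x : Int, PySem.Int.mod x pvMOD = x % pvMOD := fun x =>
        PySem.Int.mod_eq_emod_of_pos hM
      have he2 : (0:Int) ≤ e >>> (1:Nat) := by rw [hsh]; omega
      have hk : e.toNat = 2 * (e >>> (1:Nat)).toNat + (e % 2).toNat := by rw [hsh]; omega
      by_cases hodd : e % 2 = 1
      · rw [if_pos (by rw [hband]; exact hodd)]
        rw [hband, hodd, dif_pos rfl] at ih
        rw [ih he2 (by rw [hmodB]; exact Int.emod_nonneg _ (by norm_num [pvMOD]))
              (by rw [hmodB]; exact Int.emod_lt_of_pos _ hM)]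
        rw [hk, hodd, hmodB, hmodB]
        show _ % _ = _ % _
        calc (r * b % pvMOD) * (b * b % pvMOD) ^ (e >>> (1:Nat)).toNat
              ≡ (r * b) * (b * b) ^ (e >>> (1:Nat)).toNat [ZMOD pvMOD] :=
                Int.ModEq.mul (Int.emod_emod_of_dvd _ dvd_rfl)
                  (Int.ModEq.pow _ (Int.emod_emod_of_dvd _ dvd_rfl))
          _ = r * b ^ (2 * (e >>> (1:Nat)).toNat + (1:Int).toNat) := by
                simp [pow_add, pow_mul]; ring
      · have heven : e % 2 = 0 := by omega
        rw [if_neg (by rw [hband, heven]; norm_num)]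
        rw [hband, heven, dif_neg (by norm_num)] at ih
        rw [ih he2 hr0 hrM]
        rw [hk, heven, hmodB]
        show _ % _ = _ % _
        calc r * (b * b % pvMOD) ^ (e >>> (1:Nat)).toNat
              ≡ r * (b * b) ^ (e >>> (1:Nat)).toNat [ZMOD pvMOD] :=
                Int.ModEq.mul (Int.ModEq.refl r)
                  (Int.ModEq.pow _ (Int.emod_emod_of_dvd _ dvd_rfl))
          _ = r * b ^ (2 * (e >>> (1:Nat)).toNat + (0:Int).toNat) := by
                simp [pow_mul, ← pow_two]
  | case2 r b e hpos =>
      intro he hr0 hrM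
      have : e = 0 := by omega
      subst this
      simp [Int.emod_eq_of_lt hr0 hrM]

-- ===== VERDICT (by name: the statement is the Claim_ definition above) =====
theorem power_reverse_spec : Claim_equal_power_reverse := by
  intro n _
  unfold Spec_power_reverse power_reverse power_reverse_alt
  have hrev : (0:Int) ≤ pvRevA n 0 := pvRevA_nonneg n 0 le_rfl
  have hM : (0:Int) < pvMOD := by norm_num [pvMOD]
  rw [pvRevB_eq_pvRevA]
  rw [pvModExp_eq 1 _ _ hrev (by norm_num) (by norm_num [pvMOD])]
  rw [show PySem.Int.mod n pvMOD = n % pvMOD from PySem.Int.mod_eq_emod_of_pos hM]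
  rw [show PySem.Int.mod (n ^ (pvRevA n 0).toNat) (10 ^ 9 + 7)
        = n ^ (pvRevA n 0).toNat % pvMOD from
      (PySem.Int.mod_eq_emod_of_pos (by norm_num)).trans (by norm_num [pvMOD])]
  rw [one_mul, pvPowEmod]
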